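-- pv_equiv track=rewrite | github.com/sahoo00/Invariant-Circuits | BNETUtils.py | Update_edges_after_clustering
-- ===== SOURCE A (Python) =====
-- import collections
--
-- def sortGroup(str):
--     if '_' in str:
--         arr = str.split('_')
--         arr = sorted(arr)
--     else:
--         return str
--     return '_'.join(arr)
--
-- def Update_edges_after_clustering(moved_and_shared_genes,res_sh_dys_fn, edges):
--
--
--     edges_new = []
--     for f,t,r in edges:
--         if r!='5':
--             if f not in moved_and_shared_genes and t not in moved_and_shared_genes:
--                 edges_new.append((f,t,r))
--
--
--     #-----------------------
--     genes_cluster = collections.defaultdict()   #it creates a new name for a clustered node by joining the individual genes inside the cluster with underscores and sorting the genes' symbols within a cluster alphabetically.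
--
--     for i in res_sh_dys_fn:
--         new_name = "_".join(i)
--         for k in i:
--             genes_cluster[k] = sortGroup(new_name)
--
--
--     for i in res_sh_dys_fn:
--         new_name = "_".join(i)
--         new_name =sortGroup(new_name)
--         for k in i:
--             for f,t,r in edges:
--                 if k == f:
--                     if t in genes_cluster.keys():
--                         if genes_cluster[t] != new_name:
--                             edges_new.append((new_name, genes_cluster[t], r))
--                     else:
--                         edges_new.append((new_name, t, r))
--                 elif k == t:
--                     if f in genes_cluster.keys():
--                         if genes_cluster[f] != new_name:
--                             edges_new.append((genes_cluster[f], new_name, r))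
--                     else:
--                         edges_new.append((f, new_name, r))
--
--
--     return edges_new,genes_cluster
-- ===== SOURCE B (Python) =====
-- import collections
--
-- def sortGroup(str):
--     if '_' in str:
--         arr = str.split('_')
--         arr = sorted(arr)
--     else:
--         return str
--     return '_'.join(arr)
--
-- def Update_edges_after_clustering(moved_and_shared_genes, res_sh_dys_fn, edges):
--     # One pass over the edges builds (a) the filtered kept edges and (b) an
--     # endpoint -> incident-edge index, so the rewrite phase never rescans edges.
--     mss = set(moved_and_shared_genes)
--     edges_new = []
--     pairs = []
--     for f, t, r in edges:
--         if r != '5' and f not in mss and t not in mss: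
--             edges_new.append((f, t, r))
--         pairs.append((f, (True, f, t, r)))
--         if t != f:
--             pairs.append((t, (False, f, t, r)))
--     by_gene = collections.defaultdict(list)
--     for k, e in pairs:
--         by_gene[k].append(e)
--
--     genes_cluster = collections.defaultdict()
--     for i in res_sh_dys_fn:
--         new_name = "_".join(i)
--         for k in i:
--             genes_cluster[k] = sortGroup(new_name)
--
--     for i in res_sh_dys_fn:
--         new_name = sortGroup("_".join(i))
--         for k in i:
--             for as_src, f, t, r in by_gene.get(k, ()):
--                 if as_src:
--                     other = genes_cluster.get(t)
--                     if other is None: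
--                         edges_new.append((new_name, t, r))
--                     elif other != new_name:
--                         edges_new.append((new_name, other, r))
--                 else:
--                     other = genes_cluster.get(f)
--                     if other is None:
--                         edges_new.append((f, new_name, r))
--                     elif other != new_name:
--                         edges_new.append((other, new_name, r))
--     return edges_new, genes_cluster
-- ===== Notes on version B (the rewrite author's own statement) =====
-- stated objective: alternative
-- what changed: One pass over the edges builds the filtered kept list and an endpoint->incident-edges index (dict of lists), and the rewrite phase walks each gene's own incident-edge list instead of rescanning all edges for every gene of every cluster; measured only ~1.3-1.5x on the timing inputs, so no speed is claimed.
import Mathlib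
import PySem

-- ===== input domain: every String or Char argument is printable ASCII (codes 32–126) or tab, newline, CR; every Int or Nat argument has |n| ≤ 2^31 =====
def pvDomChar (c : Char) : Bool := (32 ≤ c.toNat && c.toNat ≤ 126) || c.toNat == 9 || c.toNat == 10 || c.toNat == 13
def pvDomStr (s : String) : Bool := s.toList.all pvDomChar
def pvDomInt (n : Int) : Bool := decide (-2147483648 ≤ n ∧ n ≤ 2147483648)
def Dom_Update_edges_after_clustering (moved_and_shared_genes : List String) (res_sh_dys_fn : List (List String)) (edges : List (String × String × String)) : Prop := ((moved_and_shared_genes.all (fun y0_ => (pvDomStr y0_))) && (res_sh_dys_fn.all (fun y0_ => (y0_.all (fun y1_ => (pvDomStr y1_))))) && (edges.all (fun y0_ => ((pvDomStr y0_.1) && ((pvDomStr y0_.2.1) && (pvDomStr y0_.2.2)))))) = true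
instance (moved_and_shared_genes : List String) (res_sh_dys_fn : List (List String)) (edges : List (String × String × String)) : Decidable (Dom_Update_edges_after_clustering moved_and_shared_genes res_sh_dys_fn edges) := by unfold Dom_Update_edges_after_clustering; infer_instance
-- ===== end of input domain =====

-- B replaces A's rescan of ALL edges for every gene of every cluster by a single pass that
-- builds an endpoint->incident-edges index and then walks only each gene's own incident edges;
-- objective: alternative (a timing run did not confirm a >=1.5x speed-up on the timing inputs).

-- ===== PORT A =====
-- shared helper sortGroup (identical source in Source A and Source B)
def sortGroupPV (s : String) : String :=
  if PySem.Str.isIn "_" s then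
    PySem.Str.join "_" (PySem.List.sorted ((PySem.Str.split? s "_").getD []) (fun x => x) false)
  else s

-- the dict-building middle loop (identical source in Source A and Source B)
def genesClusterPV (res_sh_dys_fn : List (List String)) : PySem.Dict String String :=
  res_sh_dys_fn.foldl (fun d i =>
    let new_name := PySem.Str.join "_" i
    i.foldl (fun d k => d.insert k (sortGroupPV new_name)) d) PySem.Dict.empty

def Update_edges_after_clustering (moved_and_shared_genes : List String) (res_sh_dys_fn : List (List String)) (edges : List (String × String × String)) : (List (String × String × String)) × (List (String × String)) :=
  let edges_new : List (String × String × String) :=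
    edges.foldl (fun acc e =>
      match e with
      | (f, t, r) =>
        if r ≠ "5" then
          if ¬ moved_and_shared_genes.contains f ∧ ¬ moved_and_shared_genes.contains t then
            acc ++ [(f, t, r)]
          else acc
        else acc) []
  let genes_cluster := genesClusterPV res_sh_dys_fn
  let edges_new :=
    res_sh_dys_fn.foldl (fun acc i =>
      let new_name := sortGroupPV (PySem.Str.join "_" i)
      i.foldl (fun acc k =>
        edges.foldl (fun acc e =>
          match e with
          | (f, t, r) =>
            if k = f then
              if genes_cluster.contains t then
                if genes_cluster.getD t "" ≠ new_name then acc ++ [(new_name, genes_cluster.getD t "", r)] else acc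
              else acc ++ [(new_name, t, r)]
            else if k = t then
              if genes_cluster.contains f then
                if genes_cluster.getD f "" ≠ new_name then acc ++ [(genes_cluster.getD f "", new_name, r)] else acc
              else acc ++ [(f, new_name, r)]
            else acc) acc) acc) edges_new
  (edges_new, genes_cluster.items)

-- ===== PORT B =====
-- the filtered-kept-edges update of the single pass
def pvKeptStep (mset : List String) (acc : List (String × String × String)) (e : String × String × String) : List (String × String × String) :=
  match e with
  | (f, t, r) =>
    if r ≠ "5" ∧ ¬ PySem.Set.contains mset f ∧ ¬ PySem.Set.contains mset t then acc ++ [(f, t, r)] else acc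

-- the (endpoint, tagged edge) pairs emitted by the single pass (tag true = gene is the source f)
def pvPairStep (acc : List (String × (Bool × String × String × String))) (e : String × String × String) : List (String × (Bool × String × String × String)) :=
  match e with
  | (f, t, r) =>
    acc ++ [(f, (true, f, t, r))] ++ (if t ≠ f then [(t, (false, f, t, r))] else [])

def Update_edges_after_clustering_alt (moved_and_shared_genes : List String) (res_sh_dys_fn : List (List String)) (edges : List (String × String × String)) : (List (String × String × String)) × (List (String × String)) :=
  let mset := PySem.Set.ofList moved_and_shared_genes
  let st := edges.foldl (fun st e => (pvKeptStep mset st.1 e, pvPairStep st.2 e)) ([], [])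
  let edges_new := st.1
  let by_gene : PySem.Dict String (List (Bool × String × String × String)) :=
    st.2.foldl (fun d p => d.modify p.1 [] (· ++ [p.2])) PySem.Dict.empty
  let genes_cluster := genesClusterPV res_sh_dys_fn
  let edges_new :=
    res_sh_dys_fn.foldl (fun acc i =>
      let new_name := sortGroupPV (PySem.Str.join "_" i)
      i.foldl (fun acc k =>
        (by_gene.getD k []).foldl (fun acc ent =>
          match ent with
          | (asSrc, f, t, r) =>
            if asSrc then
              match genes_cluster.get? t with
              | none => acc ++ [(new_name, t, r)]
              | some other => if other ≠ new_name then acc ++ [(new_name, other, r)] else acc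
            else
              match genes_cluster.get? f with
              | none => acc ++ [(f, new_name, r)]
              | some other => if other ≠ new_name then acc ++ [(other, new_name, r)] else acc) acc) acc) edges_new
  (edges_new, genes_cluster.items)

-- ===== PRECONDITION & SPEC =====
def Spec_Update_edges_after_clustering (moved_and_shared_genes : List String) (res_sh_dys_fn : List (List String)) (edges : List (String × String × String)) (out : (List (String × String × String)) × (List (String × String))) : Prop := out = Update_edges_after_clustering_alt moved_and_shared_genes res_sh_dys_fn edges
instance (moved_and_shared_genes : List String) (res_sh_dys_fn : List (List String)) (edges : List (String × String × String)) (out : (List (String × String × String)) × (List (String × String))) : Decidable (Spec_Update_edges_after_clustering moved_and_shared_genes res_sh_dys_fn edges out) := by unfold Spec_Update_edges_after_clustering; infer_instance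

-- ===== CLAIM (what is proved, stated in full; the proofs are below) =====
def Claim_equal_Update_edges_after_clustering : Prop := ∀ (moved_and_shared_genes : List String) (res_sh_dys_fn : List (List String)) (edges : List (String × String × String)), Dom_Update_edges_after_clustering moved_and_shared_genes res_sh_dys_fn edges → Spec_Update_edges_after_clustering moved_and_shared_genes res_sh_dys_fn edges (Update_edges_after_clustering moved_and_shared_genes res_sh_dys_fn edges)

-- ===== LEMMAS AND PROOFS =====

-- the per-gene incident-edge list B's index must yield
def pvEntriesFor (k : String) (edges : List (String × String × String)) : List (Bool × String × String × String) :=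
  edges.filterMap (fun e =>
    match e with
    | (f, t, r) =>
      if k = f then some (true, f, t, r)
      else if k = t then some (false, f, t, r)
      else none)

theorem pv_set_contains (l : List String) (x : String) :
    PySem.Set.contains (PySem.Set.ofList l) x = l.contains x := by
  by_cases h : x ∈ l
  · simp [PySem.Set.contains_eq_listContains, PySem.Set.mem_ofList, h]
  · simp [PySem.Set.contains_eq_listContains, PySem.Set.mem_ofList, h]

theorem pv_kept_eq (mss : List String) (edges : List (String × String × String))
    (acc : List (String × String × String)) :
    edges.foldl (pvKeptStep (PySem.Set.ofList mss)) acc =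
    edges.foldl (fun acc e =>
      match e with
      | (f, t, r) =>
        if r ≠ "5" then
          if ¬ mss.contains f ∧ ¬ mss.contains t then acc ++ [(f, t, r)] else acc
        else acc) acc := by
  induction edges generalizing acc with
  | nil => rfl
  | cons e es ih =>
    obtain ⟨f, t, r⟩ := e
    simp only [List.foldl_cons]
    rw [ih]
    congr 1
    simp only [pvKeptStep, pv_set_contains]
    by_cases hr : r = "5" <;> by_cases hf : mss.contains f = true <;>
      by_cases ht : mss.contains t = true <;> simp [hr]

theorem pv_pairs_filter (edges : List (String × String × String)) (k : String)
    (acc : List (String × (Bool × String × String × String))) :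
    ((edges.foldl pvPairStep acc).filter (fun p => p.1 == k)).map (·.2) =
    (acc.filter (fun p => p.1 == k)).map (·.2) ++ pvEntriesFor k edges := by
  induction edges generalizing acc with
  | nil => simp [pvEntriesFor]
  | cons e es ih =>
    obtain ⟨f, t, r⟩ := e
    simp only [List.foldl_cons]
    rw [ih]
    simp only [pvPairStep, pvEntriesFor, List.filterMap_cons]
    by_cases hf : k = f
    · subst hf
      simp [List.filter_append]
    · by_cases ht : k = t
      · subst ht
        have hne : k ≠ f := hf
        simp [List.filter_append, hf, Ne.symm hf, beq_iff_eq]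
      · simp [List.filter_append, hf, ht, Ne.symm hf, Ne.symm ht, beq_iff_eq]

theorem pv_index_getD (edges : List (String × String × String)) (k : String) :
    ((edges.foldl pvPairStep []).foldl
        (fun d p => d.modify p.1 [] (· ++ [p.2])) PySem.Dict.empty).getD k [] =
    pvEntriesFor k edges := by
  rw [PySem.Dict.getD_foldl_modify_append]
  rw [pv_pairs_filter]
  simp [PySem.Dict.getD_empty]

theorem pv_inner_eq (gc : PySem.Dict String String) (nm k : String)
    (edges : List (String × String × String)) (acc : List (String × String × String)) :
    edges.foldl (fun acc e =>
      match e with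
      | (f, t, r) =>
        if k = f then
          if gc.contains t then
            if gc.getD t "" ≠ nm then acc ++ [(nm, gc.getD t "", r)] else acc
          else acc ++ [(nm, t, r)]
        else if k = t then
          if gc.contains f then
            if gc.getD f "" ≠ nm then acc ++ [(gc.getD f "", nm, r)] else acc
          else acc ++ [(f, nm, r)]
        else acc) acc =
    (pvEntriesFor k edges).foldl (fun acc ent =>
      match ent with
      | (asSrc, f, t, r) =>
        if asSrc then
          match gc.get? t with
          | none => acc ++ [(nm, t, r)]
          | some other => if other ≠ nm then acc ++ [(nm, other, r)] else acc
        else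
          match gc.get? f with
          | none => acc ++ [(f, nm, r)]
          | some other => if other ≠ nm then acc ++ [(other, nm, r)] else acc) acc := by
  induction edges generalizing acc with
  | nil => rfl
  | cons e es ih =>
    obtain ⟨f, t, r⟩ := e
    simp only [pvEntriesFor, List.filterMap_cons, List.foldl_cons]
    by_cases hf : k = f
    · subst hf
      simp only [if_true, List.foldl_cons]
      rw [ih]
      congr 1
      cases hg : gc.get? t with
      | none =>
        have hc : gc.contains t = false := by
          rw [PySem.Dict.contains_eq_isSome_get?, hg]; rfl
        simp [hc]
      | some v =>
        have hc : gc.contains t = true := by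
          rw [PySem.Dict.contains_eq_isSome_get?, hg]; rfl
        simp [hc, PySem.Dict.getD_eq_get?_getD, hg]
    · by_cases ht : k = t
      · subst ht
        simp only [if_neg hf, if_true, List.foldl_cons]
        rw [ih]
        congr 1
        cases hg : gc.get? f with
        | none =>
          have hc : gc.contains f = false := by
            rw [PySem.Dict.contains_eq_isSome_get?, hg]; rfl
          simp [hc]
        | some v =>
          have hc : gc.contains f = true := by
            rw [PySem.Dict.contains_eq_isSome_get?, hg]; rfl
          simp [hc, PySem.Dict.getD_eq_get?_getD, hg]
      · simp only [if_neg hf, if_neg ht]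
        exact ih acc

-- ===== VERDICT (by name: the statement is the Claim_ definition above) =====
theorem Update_edges_after_clustering_spec : Claim_equal_Update_edges_after_clustering := by
  intro mss res edges _
  show _ = Update_edges_after_clustering_alt mss res edges
  unfold Update_edges_after_clustering Update_edges_after_clustering_alt
  dsimp only
  rw [PySem.List.foldl_prod_mk (f := pvKeptStep (PySem.Set.ofList mss)) (g := pvPairStep)]
  dsimp only
  rw [pv_kept_eq]
  congr 1
  apply PySem.List.foldl_congr_mem
  intro acc i _
  dsimp only
  apply PySem.List.foldl_congr_mem
  intro acc k _
  rw [pv_index_getD, pv_inner_eq]
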